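-- pv_equiv track=rewrite | github.com/massimilianoSirgiovanni/Hill-Cipher | HillCipher/main.py | antidiagonalSum
-- ===== SOURCE A (Python) =====
-- def antidiagonalSum(matrix):
--     # COMPUTE THE ANTIDIAGONAL SUM FOR A MATRIX
--     sum = 0
--     prod = 1
--     for i in range(0, len(matrix)):
--         tmp = i
--         for j in range(len(matrix) - 1, -1, -1):
--             prod = prod * matrix[tmp % len(matrix)][j]
--             tmp = tmp + 1
--         sum = sum + prod
--         prod = 1
--     return sum
-- ===== SOURCE B (Python) =====
-- def antidiagonalSum(matrix):
--     # Column-major sweep: maintain all n antidiagonal running products at once.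
--     n = len(matrix)
--     prods = [1] * n
--     for k in range(n):
--         col = n - 1 - k
--         prods = [p * matrix[(i + k) % n][col] for i, p in enumerate(prods)]
--     return sum(prods)
-- ===== Notes on version B (the rewrite author's own statement) =====
-- stated objective: alternative
-- what changed: Inverts the loop nesting: instead of finishing each antidiagonal product one at a time with a scalar accumulator and a countdown column loop, B sweeps the matrix column by column and maintains a vector of all n running antidiagonal products, summing them at the end.
import Mathlib
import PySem

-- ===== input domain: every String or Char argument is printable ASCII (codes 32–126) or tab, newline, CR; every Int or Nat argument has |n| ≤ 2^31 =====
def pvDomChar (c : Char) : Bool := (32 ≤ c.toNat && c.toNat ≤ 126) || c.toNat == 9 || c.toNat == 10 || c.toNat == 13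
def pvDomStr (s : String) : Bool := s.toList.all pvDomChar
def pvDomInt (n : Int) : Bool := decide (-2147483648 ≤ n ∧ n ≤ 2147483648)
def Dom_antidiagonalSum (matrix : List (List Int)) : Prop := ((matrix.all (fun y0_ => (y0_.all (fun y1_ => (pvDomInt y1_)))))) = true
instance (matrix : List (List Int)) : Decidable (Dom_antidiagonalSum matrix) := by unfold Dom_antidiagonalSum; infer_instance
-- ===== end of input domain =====

-- B inverts the loop nesting of A: a column-major sweep maintaining all n running antidiagonal
-- products in a vector instead of finishing one scalar product per diagonal (objective: alternative).

-- ===== PORT A =====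
-- Row/column accesses use pyGetD; exact on Pre_ (every row has length ≥ len(matrix)),
-- outside which Python raises IndexError.
def antidiagonalSum (matrix : List (List Int)) : Int :=
  let n : Int := matrix.length
  ((PySem.List.pyRange 0 n 1).foldl
    (fun (st : Int × Int) i =>
      let inner := (PySem.List.pyRange (n - 1) (-1) (-1)).foldl
        (fun (pt : Int × Int) j =>
          (pt.1 * PySem.List.pyGetD (PySem.List.pyGetD matrix (PySem.Int.mod pt.2 n) []) j 0,
           pt.2 + 1))
        (st.2, i)
      (st.1 + inner.1, 1))
    ((0 : Int), (1 : Int))).1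

-- ===== PORT B =====
def antidiagonalSum_alt (matrix : List (List Int)) : Int :=
  let n : Int := matrix.length
  let prods0 : List Int := List.replicate matrix.length 1
  let prods := (PySem.List.pyRange 0 n 1).foldl
    (fun (prods : List Int) k =>
      let col := n - 1 - k
      (PySem.List.enumerate prods 0).map
        (fun ip => ip.2 * PySem.List.pyGetD (PySem.List.pyGetD matrix (PySem.Int.mod (ip.1 + k) n) []) col 0))
    prods0
  prods.sum

-- ===== PRECONDITION & SPEC =====
-- Exactly the inputs on which the Python A returns: every row must have at least
-- len(matrix) entries (column index runs up to len(matrix)-1), else IndexError.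
def Pre_antidiagonalSum (matrix : List (List Int)) : Prop :=
  ∀ row ∈ matrix, matrix.length ≤ row.length
instance (matrix : List (List Int)) : Decidable (Pre_antidiagonalSum matrix) := by
  unfold Pre_antidiagonalSum; infer_instance
def pvWitness_antidiagonalSum : List (List Int) := [[1, 2], [3, 4]]

def Spec_antidiagonalSum (matrix : List (List Int)) (out : Int) : Prop := out = antidiagonalSum_alt matrix
instance (matrix : List (List Int)) (out : Int) : Decidable (Spec_antidiagonalSum matrix out) := by unfold Spec_antidiagonalSum; infer_instance

-- ===== CLAIM (what is proved, stated in full; the proofs are below) =====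
def Claim_equal_antidiagonalSum : Prop := ∀ (matrix : List (List Int)), Dom_antidiagonalSum matrix → Pre_antidiagonalSum matrix → Spec_antidiagonalSum matrix (antidiagonalSum matrix)

-- ===== LEMMAS AND PROOFS =====

-- The entry both programs multiply in at position k of antidiagonal i.
def pvEntry (matrix : List (List Int)) (i k : Int) : Int :=
  PySem.List.pyGetD (PySem.List.pyGetD matrix (PySem.Int.mod (i + k) (matrix.length : Int)) []) ((matrix.length : Int) - 1 - k) 0

-- Common reference value: sum over i of the product over k of pvEntry.
def pvRef (matrix : List (List Int)) : Int :=
  ((List.range matrix.length).map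
    (fun (i : Nat) => ((List.range matrix.length).map (fun (t : Nat) => pvEntry matrix (i : Int) (t : Int))).prod)).sum

theorem pv_getD_map_range (h : Nat → Int) (n i : Nat) (hi : i < n) :
    List.getD ((List.range n).map h) i 0 = h i := by
  rw [List.getD_eq_getElem?_getD]; simp [List.getElem?_map, List.getElem?_range hi]

-- A's inner countdown loop: running (prod, tmp) over columns n-1 … 0.
theorem pv_innerA (matrix : List (List Int)) (m : Nat) (p t0 : Int) :
    ((List.range m).map (fun (k : Nat) => (matrix.length : Int) - 1 - (k : Int))).foldl
      (fun (pt : Int × Int) j =>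
        (pt.1 * PySem.List.pyGetD (PySem.List.pyGetD matrix (PySem.Int.mod pt.2 (matrix.length : Int)) []) j 0,
         pt.2 + 1))
      (p, t0)
    = (p * ((List.range m).map (fun (t : Nat) => pvEntry matrix t0 (t : Int))).prod, t0 + m) := by
  induction m with
  | zero => simp
  | succ m ih =>
      rw [List.range_succ, List.map_append, List.map_append, List.foldl_append, ih]
      simp [pvEntry, List.prod_append, mul_assoc]
      omega

-- A's outer loop: sum over a list, the scalar product slot reset to 1 each iteration.
theorem pv_outerA (Q : Int → Int) (L : List Int) : ∀ (s : Int),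
    (L.foldl (fun (st : Int × Int) i => (st.1 + st.2 * Q i, 1)) (s, 1))
    = (s + (L.map Q).sum, 1) := by
  induction L with
  | nil => simp
  | cons a L ih => intro s; simp [List.foldl_cons, ih, add_assoc]

theorem pv_A_eq_ref (matrix : List (List Int)) : antidiagonalSum matrix = pvRef matrix := by
  simp only [antidiagonalSum]
  have hm : (((matrix.length : Int) - 1) - (-1)).toNat = matrix.length := by omega
  rw [PySem.List.pyRange_neg_one, hm]
  simp only [PySem.List.pyRange_zero_nat, pv_innerA]
  rw [pv_outerA (fun i => ((List.range matrix.length).map (fun (t : Nat) => pvEntry matrix i (t : Int))).prod)]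
  simp only [List.map_map, zero_add]
  rfl

-- B's outer loop invariant: after K column sweeps, slot i holds the K-step running product.
theorem pv_foldB (matrix : List (List Int)) (K : Nat) :
    ((List.range K).map (fun (k : Nat) => (k : Int))).foldl
      (fun (prods : List Int) k =>
        (PySem.List.enumerate prods 0).map
          (fun ip => ip.2 * PySem.List.pyGetD
            (PySem.List.pyGetD matrix (PySem.Int.mod (ip.1 + k) (matrix.length : Int)) [])
            ((matrix.length : Int) - 1 - k) 0))
      (List.replicate matrix.length 1)
    = (List.range matrix.length).map
        (fun (i : Nat) => ((List.range K).map (fun (t : Nat) => pvEntry matrix (i : Int) (t : Int))).prod) := by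
  induction K with
  | zero =>
      simp
  | succ K ih =>
      rw [List.range_succ, List.map_append, List.foldl_append, ih]
      simp only [List.map_cons, List.map_nil, List.foldl_cons, List.foldl_nil]
      rw [PySem.List.enumerate_eq_map_pyRange _ 0]
      simp only [PySem.List.len_eq, List.length_map, List.length_range, PySem.List.pyRange_zero_nat, List.map_map]
      apply List.map_congr_left
      intro i hi
      simp only [List.mem_range] at hi
      simp only [Function.comp_def, PySem.List.pyGetD_natCast]
      rw [pv_getD_map_range _ _ _ hi]
      simp [pvEntry, List.prod_append]

theorem pv_B_eq_ref (matrix : List (List Int)) : antidiagonalSum_alt matrix = pvRef matrix := by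
  simp only [antidiagonalSum_alt]
  simp only [PySem.List.pyRange_zero_nat, pv_foldB]
  rfl

-- ===== VERDICT (by name: the statement is the Claim_ definition above) =====
theorem antidiagonalSum_spec : Claim_equal_antidiagonalSum := by
  intro matrix _ _
  unfold Spec_antidiagonalSum
  rw [pv_A_eq_ref, pv_B_eq_ref]
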